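-- pv_equiv track=rewrite | github.com/eugenegesdisc/diwg-data-compliance-test | diwg_dataset/metadata/dataset_keep_coordinate_values_in_coordinate_variables.py | _gdal_select_the_best_match_coordinate
-- ===== SOURCE A (Python) =====
-- def _gdal_select_the_best_match_coordinate(
--         coords:list,
--         fullpath:str, parent_path:str,
--         coord_name:str)->dict:
--     if len(coords)<1:
--         return None
--     s_coords = [k for k in coords if k[
--         'fullpath'] == fullpath and k[
--             'name'] == coord_name]
--     if len(s_coords)>0:
--         return s_coords[0]
--     s_coords = [k for k in coords if k[
--         'fullpath'].startswith(fullpath) and k[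
--             'name'] == coord_name]
--     if len(s_coords)>0:
--         return s_coords[0]
--     s_coords = [k for k in coords if k[
--         'fullpath'].startswith(fullpath)]
--     if len(s_coords)>0:
--         return s_coords[0]
--     return None
-- ===== SOURCE B (Python) =====
-- def _gdal_select_the_best_match_coordinate(
--         coords:list,
--         fullpath:str, parent_path:str,
--         coord_name:str)->dict:
--     best_exact = None
--     best_prefix_name = None
--     best_prefix = None
--     for k in coords:
--         fp = k['fullpath']
--         if best_exact is None and fp == fullpath and k['name'] == coord_name:
--             best_exact = k
--         if best_prefix_name is None and fp.startswith(fullpath) and k['name'] == coord_name: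
--             best_prefix_name = k
--         if best_prefix is None and fp.startswith(fullpath):
--             best_prefix = k
--     if best_exact is not None:
--         return best_exact
--     if best_prefix_name is not None:
--         return best_prefix_name
--     return best_prefix
-- ===== Notes on version B (the rewrite author's own statement) =====
-- stated objective: alternative
-- what changed: A makes three full filter passes over coords (exact, prefix+name, prefix); B makes one pass keeping three first-match slots and picks the best slot at the end.
import Mathlib
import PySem

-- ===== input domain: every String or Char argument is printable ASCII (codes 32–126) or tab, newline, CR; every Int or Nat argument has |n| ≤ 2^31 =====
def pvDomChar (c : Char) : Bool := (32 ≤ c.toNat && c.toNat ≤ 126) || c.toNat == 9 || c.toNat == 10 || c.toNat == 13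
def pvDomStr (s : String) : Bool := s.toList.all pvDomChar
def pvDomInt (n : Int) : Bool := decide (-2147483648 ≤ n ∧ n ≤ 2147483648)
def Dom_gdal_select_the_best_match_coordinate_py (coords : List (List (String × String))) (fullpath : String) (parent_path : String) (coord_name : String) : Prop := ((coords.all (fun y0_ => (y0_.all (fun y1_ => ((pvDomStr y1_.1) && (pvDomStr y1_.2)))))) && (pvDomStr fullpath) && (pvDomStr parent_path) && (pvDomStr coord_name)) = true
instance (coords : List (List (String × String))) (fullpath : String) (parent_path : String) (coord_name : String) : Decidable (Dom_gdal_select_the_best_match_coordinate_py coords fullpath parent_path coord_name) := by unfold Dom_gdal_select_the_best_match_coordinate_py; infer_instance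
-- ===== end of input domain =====

-- B replaces A's three full filter passes with ONE pass keeping three first-match slots (exact,
-- prefix+name, prefix) and returns the best non-empty slot; same return value on Pre_.

-- ===== PORT A =====
-- k['fullpath'] / k['name'] ported as Dict.getD with default "" — exact under Pre_ (keys present).
def pvFP (k : List (String × String)) : String := (PySem.Dict.mk k).getD "fullpath" ""
def pvNM (k : List (String × String)) : String := (PySem.Dict.mk k).getD "name" ""

def gdal_select_the_best_match_coordinate_py (coords : List (List (String × String))) (fullpath : String) (parent_path : String) (coord_name : String) : Option (List (String × String)) :=
  if coords.length < 1 then none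
  else
    let s0 := coords.filter (fun k => pvFP k == fullpath && pvNM k == coord_name)
    if s0.length > 0 then PySem.List.pyGet? s0 0
    else
      let s1 := coords.filter (fun k => PySem.Str.startswith (pvFP k) fullpath && pvNM k == coord_name)
      if s1.length > 0 then PySem.List.pyGet? s1 0
      else
        let s2 := coords.filter (fun k => PySem.Str.startswith (pvFP k) fullpath)
        if s2.length > 0 then PySem.List.pyGet? s2 0
        else none

-- ===== PORT B =====
-- one loop iteration of Source B: set each still-empty slot on its predicate's first match
def pvStep (fullpath coord_name : String)
    (st : Option (List (String × String)) × Option (List (String × String)) × Option (List (String × String)))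
    (k : List (String × String)) :
    Option (List (String × String)) × Option (List (String × String)) × Option (List (String × String)) :=
  let fp := pvFP k
  let e := match st.1 with
    | some x => some x
    | none => if fp == fullpath && pvNM k == coord_name then some k else none
  let pn := match st.2.1 with
    | some x => some x
    | none => if PySem.Str.startswith fp fullpath && pvNM k == coord_name then some k else none
  let p := match st.2.2 with
    | some x => some x
    | none => if PySem.Str.startswith fp fullpath then some k else none
  (e, pn, p)

def gdal_select_the_best_match_coordinate_py_alt (coords : List (List (String × String))) (fullpath : String) (parent_path : String) (coord_name : String) : Option (List (String × String)) :=
  let st := coords.foldl (pvStep fullpath coord_name) (none, none, none)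
  match st.1 with
  | some x => some x
  | none =>
    match st.2.1 with
    | some x => some x
    | none => st.2.2

-- ===== PRECONDITION & SPEC =====
-- Pre_ excludes coords containing a dict missing the 'fullpath' key, or missing the 'name' key while
-- its fullpath starts with the requested prefix: there Python A raises KeyError or, when its
-- short-circuit order happens to skip the missing key, returns a value B's single pass cannot reach
-- without raising KeyError itself.
def Pre_gdal_select_the_best_match_coordinate_py (coords : List (List (String × String))) (fullpath : String) (parent_path : String) (coord_name : String) : Prop :=
  ∀ k ∈ coords, ((PySem.Dict.mk k).get? "fullpath").isSome ∧
    (PySem.Str.startswith ((PySem.Dict.mk k).getD "fullpath" "") fullpath → ((PySem.Dict.mk k).get? "name").isSome)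
instance (coords : List (List (String × String))) (fullpath : String) (parent_path : String) (coord_name : String) : Decidable (Pre_gdal_select_the_best_match_coordinate_py coords fullpath parent_path coord_name) := by unfold Pre_gdal_select_the_best_match_coordinate_py; infer_instance

def pvWitness_gdal_select_the_best_match_coordinate_py : (List (List (String × String))) × String × String × String :=
  ([[("fullpath", "/g/x"), ("name", "x")], [("fullpath", "/g/xy"), ("name", "x")]], "/g/x", "/g", "x")

def Spec_gdal_select_the_best_match_coordinate_py (coords : List (List (String × String))) (fullpath : String) (parent_path : String) (coord_name : String) (out : Option (List (String × String))) : Prop := out = gdal_select_the_best_match_coordinate_py_alt coords fullpath parent_path coord_name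
instance (coords : List (List (String × String))) (fullpath : String) (parent_path : String) (coord_name : String) (out : Option (List (String × String))) : Decidable (Spec_gdal_select_the_best_match_coordinate_py coords fullpath parent_path coord_name out) := by unfold Spec_gdal_select_the_best_match_coordinate_py; infer_instance

-- ===== CLAIM (what is proved, stated in full; the proofs are below) =====
def Claim_equal_gdal_select_the_best_match_coordinate_py : Prop := ∀ (coords : List (List (String × String))) (fullpath : String) (parent_path : String) (coord_name : String), Dom_gdal_select_the_best_match_coordinate_py coords fullpath parent_path coord_name → Pre_gdal_select_the_best_match_coordinate_py coords fullpath parent_path coord_name → Spec_gdal_select_the_best_match_coordinate_py coords fullpath parent_path coord_name (gdal_select_the_best_match_coordinate_py coords fullpath parent_path coord_name)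

-- ===== LEMMAS AND PROOFS =====
-- the fold keeps, in each slot, the first element of coords satisfying that slot's predicate
theorem pvFold_inv (fullpath coord_name : String) (l : List (List (String × String)))
    (st : Option (List (String × String)) × Option (List (String × String)) × Option (List (String × String))) :
    l.foldl (pvStep fullpath coord_name) st =
      ((match st.1 with
        | some x => some x
        | none => (l.filter (fun k => pvFP k == fullpath && pvNM k == coord_name)).head?),
       (match st.2.1 with
        | some x => some x
        | none => (l.filter (fun k => PySem.Str.startswith (pvFP k) fullpath && pvNM k == coord_name)).head?),
       (match st.2.2 with
        | some x => some x
        | none => (l.filter (fun k => PySem.Str.startswith (pvFP k) fullpath)).head?)) := by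
  induction l generalizing st with
  | nil =>
    obtain ⟨e, pn, p⟩ := st
    cases e <;> cases pn <;> cases p <;> simp
  | cons a t ih =>
    obtain ⟨e, pn, p⟩ := st
    simp only [List.foldl_cons, ih]
    unfold pvStep
    cases e <;> cases pn <;> cases p <;>
      simp only [List.filter_cons] <;> split_ifs <;> simp_all

theorem gdal_select_the_best_match_coordinate_py_spec : Claim_equal_gdal_select_the_best_match_coordinate_py := by
  intro coords fullpath parent_path coord_name _ _
  unfold Spec_gdal_select_the_best_match_coordinate_py
  unfold gdal_select_the_best_match_coordinate_py gdal_select_the_best_match_coordinate_py_alt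
  rw [pvFold_inv]
  cases h0 : coords.filter (fun k => pvFP k == fullpath && pvNM k == coord_name) with
  | cons x xs =>
    have hne : coords ≠ [] := by
      intro h; rw [h] at h0; simp at h0
    simp [hne]
  | nil =>
    cases h1 : coords.filter (fun k => PySem.Str.startswith (pvFP k) fullpath && pvNM k == coord_name) with
    | cons x xs =>
      have hne : coords ≠ [] := by
        intro h; rw [h] at h1; simp at h1
      simp [hne]
    | nil =>
      cases h2 : coords.filter (fun k => PySem.Str.startswith (pvFP k) fullpath) with
      | cons x xs =>
        have hne : coords ≠ [] := by
          intro h; rw [h] at h2; simp at h2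
        simp [hne]
      | nil =>
        cases coords with
        | nil => simp
        | cons c cs => simp
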